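-- pv_equiv track=rewrite | github.com/SnehaNDeshmukh/AI-password-Manager | utils/helpers.py | find_reused_passwords
-- ===== SOURCE A (Python) =====
-- def find_reused_passwords(credentials: list[dict]) -> dict[str, list[str]]:
--     """
--     Given a list of {'website': ..., 'password': ...} dicts,
--     return a mapping of password → list of websites using it.
--     Only entries with 2+ uses are returned.
--     """
--     pwd_map: dict[str, list[str]] = {}
--     for cred in credentials:
--         pwd = cred.get("password", "")
--         site = cred.get("website", "unknown")
--         if pwd:
--             pwd_map.setdefault(pwd, []).append(site)
--     return {k: v for k, v in pwd_map.items() if len(v) > 1}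
-- ===== SOURCE B (Python) =====
-- def find_reused_passwords(credentials: list[dict]) -> dict[str, list[str]]:
--     # Two-pass: count password uses first, then build only the reused groups.
--     counts = {}
--     for cred in credentials:
--         pwd = cred.get("password", "")
--         if pwd:
--             counts[pwd] = counts.get(pwd, 0) + 1
--     result = {}
--     for cred in credentials:
--         pwd = cred.get("password", "")
--         if pwd and counts.get(pwd, 0) > 1:
--             result.setdefault(pwd, []).append(cred.get("website", "unknown"))
--     return result
-- ===== Notes on version B (the rewrite author's own statement) =====
-- stated objective: alternative
-- what changed: Instead of building a full password->websites map and then filtering groups by length, B first counts password uses in one pass and then builds only the reused groups in a second pass, so no non-reused group is ever materialised.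
import Mathlib
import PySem

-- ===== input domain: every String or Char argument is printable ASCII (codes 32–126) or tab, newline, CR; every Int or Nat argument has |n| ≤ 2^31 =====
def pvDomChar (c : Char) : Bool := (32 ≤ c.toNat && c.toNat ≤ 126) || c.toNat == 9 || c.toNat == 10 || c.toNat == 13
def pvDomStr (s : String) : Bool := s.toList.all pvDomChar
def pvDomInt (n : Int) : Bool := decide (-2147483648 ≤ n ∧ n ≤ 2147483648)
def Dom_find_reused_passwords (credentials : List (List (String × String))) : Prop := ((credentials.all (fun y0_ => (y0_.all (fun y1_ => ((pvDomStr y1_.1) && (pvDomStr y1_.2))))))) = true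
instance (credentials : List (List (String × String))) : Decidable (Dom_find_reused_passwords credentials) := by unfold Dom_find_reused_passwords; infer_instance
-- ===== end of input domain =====

-- One honest line: B replaces "build all groups then filter by size" with "count passwords, then build only reused groups"; same O(n) cost.

-- cred.get("password", "") / cred.get("website", "unknown")
def pvPwd (cred : List (String × String)) : String := (PySem.Dict.mk cred).getD "password" ""
def pvSite (cred : List (String × String)) : String := (PySem.Dict.mk cred).getD "website" "unknown"

-- ===== PORT A =====
def find_reused_passwords (credentials : List (List (String × String))) : List (String × List String) :=
  let pwd_map : PySem.Dict String (List String) :=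
    credentials.foldl (fun m cred =>
      if pvPwd cred ≠ "" then m.modify (pvPwd cred) [] (· ++ [pvSite cred]) else m)
      PySem.Dict.empty
  pwd_map.items.filter (fun kv => kv.2.length > 1)

-- ===== PORT B =====
def find_reused_passwords_alt (credentials : List (List (String × String))) : List (String × List String) :=
  let counts : PySem.Dict String Int :=
    credentials.foldl (fun d cred =>
      if pvPwd cred ≠ "" then d.insert (pvPwd cred) (d.getD (pvPwd cred) 0 + 1) else d)
      PySem.Dict.empty
  let result : PySem.Dict String (List String) :=
    credentials.foldl (fun d cred =>
      if pvPwd cred ≠ "" ∧ counts.getD (pvPwd cred) 0 > 1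
      then d.modify (pvPwd cred) [] (· ++ [pvSite cred]) else d)
      PySem.Dict.empty
  result.items

-- ===== PRECONDITION & SPEC =====
def Spec_find_reused_passwords (credentials : List (List (String × String))) (out : List (String × List String)) : Prop := out = find_reused_passwords_alt credentials
instance (credentials : List (List (String × String))) (out : List (String × List String)) : Decidable (Spec_find_reused_passwords credentials out) := by unfold Spec_find_reused_passwords; infer_instance

-- ===== CLAIM (what is proved, stated in full; the proofs are below) =====
def Claim_equal_find_reused_passwords : Prop := ∀ (credentials : List (List (String × String))), Dom_find_reused_passwords credentials → Spec_find_reused_passwords credentials (find_reused_passwords credentials)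

-- ===== LEMMAS AND PROOFS =====

-- The flat list of (password, website) pairs with non-empty password, and the multiplicity of a password in it.
def pvPairs (cs : List (List (String × String))) : List (String × String) :=
  (cs.map (fun c => (pvPwd c, pvSite c))).filter (fun p => p.1 ≠ "")

def pvCnt (cs : List (List (String × String))) (k : String) : Nat :=
  (pvPairs cs).countP (fun p => p.1 == k)

theorem pvPairs_cons (c : List (String × String)) (cs : List (List (String × String))) :
    pvPairs (c :: cs)
      = (if pvPwd c = "" then pvPairs cs else (pvPwd c, pvSite c) :: pvPairs cs) := by
  unfold pvPairs
  rw [List.map_cons, List.filter_cons]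
  by_cases h : pvPwd c = "" <;> simp [h]

-- a guarded fold over credentials is a fold over the pair list
theorem pv_foldl_pairs {β : Type} (cs : List (List (String × String)))
    (M : β → (String × String) → β) (d0 : β) :
    cs.foldl (fun d c => if pvPwd c ≠ "" then M d (pvPwd c, pvSite c) else d) d0
      = (pvPairs cs).foldl M d0 := by
  induction cs generalizing d0 with
  | nil => rfl
  | cons c cs ih =>
    rw [List.foldl_cons, pvPairs_cons]
    by_cases h : pvPwd c = ""
    · rw [if_pos h, if_neg (fun hc => hc h), ih]
    · rw [if_neg h, if_pos h, List.foldl_cons, ih]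

-- the doubly-guarded fold of B is a fold over the filtered pair list
theorem pv_foldl_pairs_filter {β : Type} (cs : List (List (String × String)))
    (q : String → Prop) [DecidablePred q] (M : β → (String × String) → β) (d0 : β) :
    cs.foldl (fun d c => if pvPwd c ≠ "" ∧ q (pvPwd c) then M d (pvPwd c, pvSite c) else d) d0
      = ((pvPairs cs).filter (fun p => decide (q p.1))).foldl M d0 := by
  induction cs generalizing d0 with
  | nil => rfl
  | cons c cs ih =>
    rw [List.foldl_cons, pvPairs_cons]
    by_cases h : pvPwd c = ""
    · rw [if_pos h, if_neg (fun hc => hc.1 h), ih]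
    · rw [if_neg h, List.filter_cons]
      by_cases hq : q (pvPwd c)
      · rw [if_pos ⟨h, hq⟩, if_pos (by simpa using hq), List.foldl_cons, ih]
      · rw [if_neg (fun hc => hq hc.2), if_neg (by simpa using hq), ih]

-- items of the grouping fold, in closed form
theorem pv_items_group (l : List (String × String)) :
    ((l.foldl (fun d p => d.modify p.1 [] (· ++ [p.2])) PySem.Dict.empty).items :
        List (String × List String))
      = (PySem.Set.ofList (l.map Prod.fst)).map
          (fun k => (k, (l.filter (fun p => p.1 == k)).map Prod.snd)) := by
  have hnd : (l.foldl (fun d p => d.modify p.1 [] (· ++ [p.2])) PySem.Dict.empty).keys.Nodup := by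
    apply PySem.Dict.nodup_keys_foldl_modify_key
    exact PySem.Dict.nodup_keys_empty
  rw [PySem.Dict.items_eq_map_keys _ hnd []]
  have hk : (l.foldl (fun d p => d.modify p.1 [] (· ++ [p.2])) PySem.Dict.empty).keys
      = PySem.Set.ofList (l.map Prod.fst) := by
    rw [PySem.Dict.keys_foldl_modify_key, PySem.Dict.keys_empty, PySem.Set.update_nil_left]
  rw [hk]
  apply List.map_congr_left
  intro k hk2
  rw [PySem.Dict.getD_foldl_modify_append, PySem.Dict.getD_empty]
  simp

-- the counts dict looks up the multiplicity
theorem pv_cnt_fold (cs : List (List (String × String))) (k : String) :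
    (((pvPairs cs).foldl (fun d p => d.insert p.1 (d.getD p.1 0 + 1)) PySem.Dict.empty).getD k 0)
      = (pvCnt cs k : Int) := by
  have h := (List.foldl_map (f := Prod.fst)
    (g := fun (d : PySem.Dict String Int) x => d.insert x (d.getD x 0 + 1))
    (l := pvPairs cs) (init := PySem.Dict.empty)).symm
  rw [show (fun (d : PySem.Dict String Int) (p : String × String) => d.insert p.1 (d.getD p.1 0 + 1))
      = (fun d p => (fun (d : PySem.Dict String Int) x => d.insert x (d.getD x 0 + 1)) d p.1) from rfl]
  rw [h, PySem.Dict.getD_foldl_insert_add_one, PySem.Dict.getD_empty]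
  simp [pvCnt, List.count, List.countP_map]
  rfl

-- PySem.Set.ofList commutes with filter
theorem pv_ofList_filter {α : Type} [BEq α] [LawfulBEq α] [DecidableEq α]
    (p : α → Bool) (l : List α) :
    PySem.Set.ofList (l.filter p) = (PySem.Set.ofList l).filter p := by
  induction l with
  | nil => rfl
  | cons x xs ih =>
    by_cases hp : p x = true
    · simp [hp, PySem.Set.ofList_cons, ih, PySem.Set.discard, Bool.and_comm, List.filter_filter]
    · simp only [List.filter_cons, hp, Bool.false_eq_true, if_false, PySem.Set.ofList_cons, ih]
      simp only [PySem.Set.discard, List.filter_filter]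
      apply List.filter_congr
      intro y hy
      by_cases h : y = x
      · subst h; simp [hp]
      · simp [h]

-- ===== VERDICT (by name: the statement is the Claim_ definition above) =====
set_option maxHeartbeats 2000000 in
theorem find_reused_passwords_spec : Claim_equal_find_reused_passwords := by
  intro cs _
  unfold Spec_find_reused_passwords
  simp only [find_reused_passwords, find_reused_passwords_alt]
  have hA : (List.foldl (fun m cred =>
        if pvPwd cred ≠ "" then m.modify (pvPwd cred) [] fun x => x ++ [pvSite cred] else m)
        PySem.Dict.empty cs)
      = (pvPairs cs).foldl (fun d p => d.modify p.1 [] (· ++ [p.2])) PySem.Dict.empty :=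
    pv_foldl_pairs cs (fun d p => d.modify p.1 [] (· ++ [p.2])) PySem.Dict.empty
  have hC : (List.foldl (fun (d : PySem.Dict String Int) cred =>
        if pvPwd cred ≠ "" then d.insert (pvPwd cred) (d.getD (pvPwd cred) 0 + 1) else d)
        PySem.Dict.empty cs)
      = (pvPairs cs).foldl (fun d p => d.insert p.1 (d.getD p.1 0 + 1)) PySem.Dict.empty :=
    pv_foldl_pairs cs (fun (d : PySem.Dict String Int) p => d.insert p.1 (d.getD p.1 0 + 1)) PySem.Dict.empty
  rw [hA]
  have hB : (List.foldl (fun d cred =>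
        if pvPwd cred ≠ "" ∧
            (List.foldl (fun (d : PySem.Dict String Int) cred =>
              if pvPwd cred ≠ "" then d.insert (pvPwd cred) (d.getD (pvPwd cred) 0 + 1) else d)
              PySem.Dict.empty cs).getD (pvPwd cred) 0 > 1
        then d.modify (pvPwd cred) [] fun x => x ++ [pvSite cred] else d)
        PySem.Dict.empty cs)
      = ((pvPairs cs).filter (fun p =>
          decide ((List.foldl (fun (d : PySem.Dict String Int) cred =>
            if pvPwd cred ≠ "" then d.insert (pvPwd cred) (d.getD (pvPwd cred) 0 + 1) else d)
            PySem.Dict.empty cs).getD p.1 0 > 1))).foldl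
          (fun d p => d.modify p.1 [] (· ++ [p.2])) PySem.Dict.empty :=
    pv_foldl_pairs_filter cs
      (fun k => (List.foldl (fun (d : PySem.Dict String Int) cred =>
        if pvPwd cred ≠ "" then d.insert (pvPwd cred) (d.getD (pvPwd cred) 0 + 1) else d)
        PySem.Dict.empty cs).getD k 0 > 1)
      (fun d p => d.modify p.1 [] (· ++ [p.2])) PySem.Dict.empty
  refine Eq.trans ?_ (congrArg PySem.Dict.items hB).symm
  have hq : ((pvPairs cs).filter (fun p =>
        decide ((List.foldl (fun (d : PySem.Dict String Int) cred =>
          if pvPwd cred ≠ "" then d.insert (pvPwd cred) (d.getD (pvPwd cred) 0 + 1) else d)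
          PySem.Dict.empty cs).getD p.1 0 > 1)))
      = (pvPairs cs).filter (fun p => decide (1 < pvCnt cs p.1)) := by
    apply List.filter_congr
    intro p hp
    simp only [gt_iff_lt, hC, pv_cnt_fold]
    simp
  rw [hq, pv_items_group, pv_items_group]
  rw [List.filter_map]
  have h1 : ((PySem.Set.ofList ((pvPairs cs).map Prod.fst)).filter
        ((fun kv : String × List String => decide (kv.2.length > 1)) ∘
          (fun k => (k, ((pvPairs cs).filter (fun p => p.1 == k)).map Prod.snd))))
      = (PySem.Set.ofList ((pvPairs cs).map Prod.fst)).filter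
          (fun k => decide (1 < pvCnt cs k)) := by
    apply List.filter_congr
    intro k hk
    simp [Function.comp, ← List.countP_eq_length_filter, pvCnt]
  rw [h1]
  have h2 : (((pvPairs cs).filter (fun p => decide (1 < pvCnt cs p.1))).map Prod.fst)
      = ((pvPairs cs).map Prod.fst).filter (fun k => decide (1 < pvCnt cs k)) :=
    (@List.filter_map (String × String) String Prod.fst
      (fun k => decide (1 < pvCnt cs k)) (pvPairs cs)).symm
  rw [h2, pv_ofList_filter]
  apply List.map_congr_left
  intro k hk
  rcases List.mem_filter.mp hk with ⟨hkmem, hkcnt⟩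
  have hgt : 1 < pvCnt cs k := by simpa using hkcnt
  congr 1
  congr 1
  rw [List.filter_filter]
  apply List.filter_congr
  intro p hp
  by_cases h : p.1 = k
  · simp [h, hgt]
  · simp [h]
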